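-- pv_equiv track=rewrite | github.com/TheRealLuro/enigma | enigma_server/apis/maze/maze.py | get_grid_info
-- ===== SOURCE A (Python) =====
-- def get_grid_info(size):
--
--     corners = [(0,0), (0,size-1), (size-1,0), (size-1,size-1)]
--     left_edges = [(0, y) for y in range(1, size-1)]
--     top_edges = [(x, 0) for x in range(1, size-1)]
--     right_edges = [(size-1, y) for y in range(1, size-1)]
--     bottom_edges = [(x, size-1) for x in range(1, size-1)]
--     inside = [(x, y) for x in range(1, size-1) for y in range(1, size-1)]
--
--     coordinates = {
--         'corners': corners,
--         'left_edges': left_edges,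
--         'bottom_edges': top_edges,
--         'right_edges': right_edges,
--         'top_edges': bottom_edges,
--         'inside': inside
--     }
--
--
--     return coordinates
-- ===== SOURCE B (Python) =====
-- def get_grid_info(size):
--     # One nested scan over the grid, classifying each cell, instead of five comprehensions.
--     corners = [(0, 0), (0, size - 1), (size - 1, 0), (size - 1, size - 1)]
--     left, right, top, bottom, inside = [], [], [], [], []
--     last = size - 1
--     for x in range(size):
--         for y in range(size):
--             if (x == 0 or x == last) and (y == 0 or y == last):
--                 continue  # corner cell, already listed literally
--             if x == 0:
--                 left.append((x, y))
--             elif x == last: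
--                 right.append((x, y))
--             elif y == 0:
--                 top.append((x, y))
--             elif y == last:
--                 bottom.append((x, y))
--             else:
--                 inside.append((x, y))
--     return {
--         'corners': corners,
--         'left_edges': left,
--         'bottom_edges': top,
--         'right_edges': right,
--         'top_edges': bottom,
--         'inside': inside,
--     }
-- ===== Notes on version B (the rewrite author's own statement) =====
-- stated objective: alternative
-- what changed: Replaces A's five separate range-comprehensions (plus a hardcoded corner list) by one nested x-outer/y-inner scan over the whole grid that classifies each cell as corner (skipped; corners stay a literal), left/right/top/bottom edge or inside, accumulating the five lists in a single pass.
import Mathlib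
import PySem

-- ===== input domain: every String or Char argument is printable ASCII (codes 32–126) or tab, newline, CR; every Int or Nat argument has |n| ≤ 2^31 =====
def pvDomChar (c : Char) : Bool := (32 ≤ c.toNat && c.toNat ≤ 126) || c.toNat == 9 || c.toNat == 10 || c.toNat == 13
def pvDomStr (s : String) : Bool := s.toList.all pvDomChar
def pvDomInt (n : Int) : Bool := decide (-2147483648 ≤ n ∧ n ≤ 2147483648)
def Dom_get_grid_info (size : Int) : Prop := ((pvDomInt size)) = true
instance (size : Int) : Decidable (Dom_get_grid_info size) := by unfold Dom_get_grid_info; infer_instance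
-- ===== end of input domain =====

-- B replaces A's five separate range-comprehensions by one nested scan over the grid
-- that classifies each cell (objective: alternative decomposition, same cost).

-- ===== PORT A =====
def get_grid_info (size : Int) : List (String × List (Int × Int)) :=
  let corners : List (Int × Int) := [(0, 0), (0, size - 1), (size - 1, 0), (size - 1, size - 1)]
  let left_edges := (PySem.List.pyRange 1 (size - 1)).map (fun y => ((0 : Int), y))
  let top_edges := (PySem.List.pyRange 1 (size - 1)).map (fun x => (x, (0 : Int)))
  let right_edges := (PySem.List.pyRange 1 (size - 1)).map (fun y => (size - 1, y))
  let bottom_edges := (PySem.List.pyRange 1 (size - 1)).map (fun x => (x, size - 1))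
  let inside := (PySem.List.pyRange 1 (size - 1)).flatMap
      (fun x => (PySem.List.pyRange 1 (size - 1)).map (fun y => (x, y)))
  [("corners", corners), ("left_edges", left_edges), ("bottom_edges", top_edges),
   ("right_edges", right_edges), ("top_edges", bottom_edges), ("inside", inside)]

-- ===== PORT B =====
-- state: (left, right, top, bottom, inside), in that order, as in Source B's tuple of lists
def get_grid_info_alt (size : Int) : List (String × List (Int × Int)) :=
  let last := size - 1
  let st :=
    (PySem.List.pyRange 0 size).foldl (fun st x =>
      (PySem.List.pyRange 0 size).foldl (fun st y =>
        if (x = 0 ∨ x = last) ∧ (y = 0 ∨ y = last) then st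
        else if x = 0 then (st.1 ++ [(x, y)], st.2.1, st.2.2.1, st.2.2.2.1, st.2.2.2.2)
        else if x = last then (st.1, st.2.1 ++ [(x, y)], st.2.2.1, st.2.2.2.1, st.2.2.2.2)
        else if y = 0 then (st.1, st.2.1, st.2.2.1 ++ [(x, y)], st.2.2.2.1, st.2.2.2.2)
        else if y = last then (st.1, st.2.1, st.2.2.1, st.2.2.2.1 ++ [(x, y)], st.2.2.2.2)
        else (st.1, st.2.1, st.2.2.1, st.2.2.2.1, st.2.2.2.2 ++ [(x, y)])) st)
      (([], [], [], [], []) :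
        List (Int × Int) × List (Int × Int) × List (Int × Int) × List (Int × Int) × List (Int × Int))
  [("corners", [(0, 0), (0, last), (last, 0), (last, last)]),
   ("left_edges", st.1), ("bottom_edges", st.2.2.1), ("right_edges", st.2.1),
   ("top_edges", st.2.2.2.1), ("inside", st.2.2.2.2)]

-- ===== PRECONDITION & SPEC =====
def Spec_get_grid_info (size : Int) (out : List (String × List (Int × Int))) : Prop := out = get_grid_info_alt size
instance (size : Int) (out : List (String × List (Int × Int))) : Decidable (Spec_get_grid_info size out) := by unfold Spec_get_grid_info; infer_instance

-- ===== CLAIM (what is proved, stated in full; the proofs are below) =====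
def Claim_equal_get_grid_info : Prop := ∀ (size : Int), Dom_get_grid_info size → Spec_get_grid_info size (get_grid_info size)

-- ===== LEMMAS AND PROOFS =====

-- the state type of B's scan
abbrev GridSt : Type :=
  List (Int × Int) × List (Int × Int) × List (Int × Int) × List (Int × Int) × List (Int × Int)

-- B's inner loop body, with x and last as parameters
def gridStep (last x : Int) (st : GridSt) (y : Int) : GridSt :=
  if (x = 0 ∨ x = last) ∧ (y = 0 ∨ y = last) then st
  else if x = 0 then (st.1 ++ [(x, y)], st.2.1, st.2.2.1, st.2.2.2.1, st.2.2.2.2)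
  else if x = last then (st.1, st.2.1 ++ [(x, y)], st.2.2.1, st.2.2.2.1, st.2.2.2.2)
  else if y = 0 then (st.1, st.2.1, st.2.2.1 ++ [(x, y)], st.2.2.2.1, st.2.2.2.2)
  else if y = last then (st.1, st.2.1, st.2.2.1, st.2.2.2.1 ++ [(x, y)], st.2.2.2.2)
  else (st.1, st.2.1, st.2.2.1, st.2.2.2.1, st.2.2.2.2 ++ [(x, y)])

-- fold that only appends to component 1
theorem foldl_comp1 (l : List Int) (g : Int → Int × Int) (a b c d e : List (Int × Int)) :
    l.foldl (fun (st : GridSt) y => (st.1 ++ [g y], st.2.1, st.2.2.1, st.2.2.2.1, st.2.2.2.2))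
      (a, b, c, d, e) = (a ++ l.map g, b, c, d, e) := by
  induction l generalizing a with
  | nil => simp
  | cons h t ih => simp [ih, List.append_assoc]

-- fold that only appends to component 2
theorem foldl_comp2 (l : List Int) (g : Int → Int × Int) (a b c d e : List (Int × Int)) :
    l.foldl (fun (st : GridSt) y => (st.1, st.2.1 ++ [g y], st.2.2.1, st.2.2.2.1, st.2.2.2.2))
      (a, b, c, d, e) = (a, b ++ l.map g, c, d, e) := by
  induction l generalizing b with
  | nil => simp
  | cons h t ih => simp [ih, List.append_assoc]

-- fold that only appends to component 5
theorem foldl_comp5 (l : List Int) (g : Int → Int × Int) (a b c d e : List (Int × Int)) :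
    l.foldl (fun (st : GridSt) y => (st.1, st.2.1, st.2.2.1, st.2.2.2.1, st.2.2.2.2 ++ [g y]))
      (a, b, c, d, e) = (a, b, c, d, e ++ l.map g) := by
  induction l generalizing e with
  | nil => simp
  | cons h t ih => simp [ih, List.append_assoc]

-- range(size) = [0] ++ range(1, size-1) ++ [size-1] once size ≥ 2
theorem range_split {size : Int} (h : 2 ≤ size) :
    PySem.List.pyRange 0 size = 0 :: PySem.List.pyRange 1 (size - 1) ++ [size - 1] := by
  rw [PySem.List.pyRange_one_cons (by omega : (0:Int) < size)]
  have e := PySem.List.pyRange_one_succ_right (a := 1) (b := size - 1) (by omega : (1:Int) ≤ size - 1)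
  rw [sub_add_cancel] at e
  simp [e]

-- row at x = 0: only the left list grows, by the middle ys
theorem row_left {size : Int} (h : 2 ≤ size) (st : GridSt) :
    (PySem.List.pyRange 0 size).foldl (gridStep (size - 1) 0) st =
      (st.1 ++ (PySem.List.pyRange 1 (size - 1)).map (fun y => ((0 : Int), y)),
       st.2.1, st.2.2.1, st.2.2.2.1, st.2.2.2.2) := by
  rw [range_split h]
  simp only [List.foldl_append, List.foldl]
  have h0 : gridStep (size - 1) 0 st 0 = st := by
    simp [gridStep]
  rw [h0]
  rw [PySem.List.foldl_congr_mem _ (gridStep (size - 1) 0)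
      (fun (st : GridSt) y => (st.1 ++ [((0 : Int), y)], st.2.1, st.2.2.1, st.2.2.2.1, st.2.2.2.2))
      st
      (by
        intro acc y hy
        rw [PySem.List.mem_pyRange_one] at hy
        simp [gridStep]
        omega)]
  rw [foldl_comp1]
  simp [gridStep]

-- row at x = size-1: only the right list grows
theorem row_right {size : Int} (h : 2 ≤ size) (st : GridSt) :
    (PySem.List.pyRange 0 size).foldl (gridStep (size - 1) (size - 1)) st =
      (st.1, st.2.1 ++ (PySem.List.pyRange 1 (size - 1)).map (fun y => (size - 1, y)),
       st.2.2.1, st.2.2.2.1, st.2.2.2.2) := by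
  rw [range_split h]
  simp only [List.foldl_append, List.foldl]
  have h0 : gridStep (size - 1) (size - 1) st 0 = st := by
    simp [gridStep]
  rw [h0]
  rw [PySem.List.foldl_congr_mem _ (gridStep (size - 1) (size - 1))
      (fun (st : GridSt) y => (st.1, st.2.1 ++ [(size - 1, y)], st.2.2.1, st.2.2.2.1, st.2.2.2.2))
      st
      (by
        intro acc y hy
        rw [PySem.List.mem_pyRange_one] at hy
        have hne : ¬ (size - 1 = 0) := by omega
        simp [gridStep, hne]
        omega)]
  rw [foldl_comp2]
  simp [gridStep]

-- row at a middle x: top gets (x,0), bottom gets (x,size-1), inside gets the middle ys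
theorem row_mid {size x : Int} (h : 2 ≤ size) (hx : 1 ≤ x ∧ x < size - 1) (st : GridSt) :
    (PySem.List.pyRange 0 size).foldl (gridStep (size - 1) x) st =
      (st.1, st.2.1, st.2.2.1 ++ [(x, (0 : Int))], st.2.2.2.1 ++ [(x, size - 1)],
       st.2.2.2.2 ++ (PySem.List.pyRange 1 (size - 1)).map (fun y => (x, y))) := by
  have hx0 : ¬ (x = 0) := by omega
  have hxl : ¬ (x = size - 1) := by omega
  have hl0 : ¬ (size - 1 = 0) := by omega
  rw [range_split h]
  simp only [List.foldl_append, List.foldl]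
  have h0 : gridStep (size - 1) x st 0 =
      (st.1, st.2.1, st.2.2.1 ++ [(x, (0 : Int))], st.2.2.2.1, st.2.2.2.2) := by
    simp [gridStep, hx0, hxl]
  rw [h0]
  rw [PySem.List.foldl_congr_mem _ (gridStep (size - 1) x)
      (fun (st : GridSt) y => (st.1, st.2.1, st.2.2.1, st.2.2.2.1, st.2.2.2.2 ++ [(x, y)]))
      _
      (by
        intro acc y hy
        rw [PySem.List.mem_pyRange_one] at hy
        have hy0 : ¬ (y = 0) := by omega
        have hyl : ¬ (y = size - 1) := by omega
        simp [gridStep, hx0, hxl, hy0, hyl])]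
  rw [foldl_comp5]
  simp [gridStep, hx0, hxl, hl0]

-- outer fold over the middle xs, from any state
theorem fold_mid {size : Int} (h : 2 ≤ size) (l : List Int)
    (hl : ∀ x ∈ l, 1 ≤ x ∧ x < size - 1) (a b c d e : List (Int × Int)) :
    l.foldl (fun st x => (PySem.List.pyRange 0 size).foldl (gridStep (size - 1) x) st)
      (a, b, c, d, e) =
      (a, b, c ++ l.map (fun x => (x, (0 : Int))), d ++ l.map (fun x => (x, size - 1)),
       e ++ l.flatMap (fun x => (PySem.List.pyRange 1 (size - 1)).map (fun y => (x, y)))) := by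
  induction l generalizing c d e with
  | nil => simp
  | cons hd t ih =>
      have hhd := hl hd (List.mem_cons_self ..)
      simp only [List.foldl_cons]
      rw [row_mid h hhd]
      rw [ih (fun x hx => hl x (List.mem_cons_of_mem _ hx))]
      simp [List.append_assoc]

-- B's whole scan, closed form, for size ≥ 2
theorem scan_eq {size : Int} (h : 2 ≤ size) :
    (PySem.List.pyRange 0 size).foldl (fun st x =>
        (PySem.List.pyRange 0 size).foldl (gridStep (size - 1) x) st)
      (([], [], [], [], []) : GridSt) =
      ((PySem.List.pyRange 1 (size - 1)).map (fun y => ((0 : Int), y)),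
       (PySem.List.pyRange 1 (size - 1)).map (fun y => (size - 1, y)),
       (PySem.List.pyRange 1 (size - 1)).map (fun x => (x, (0 : Int))),
       (PySem.List.pyRange 1 (size - 1)).map (fun x => (x, size - 1)),
       (PySem.List.pyRange 1 (size - 1)).flatMap
         (fun x => (PySem.List.pyRange 1 (size - 1)).map (fun y => (x, y)))) := by
  set f : GridSt → Int → GridSt :=
    fun st x => (PySem.List.pyRange 0 size).foldl (gridStep (size - 1) x) st with hf
  rw [range_split h]
  simp only [List.foldl_cons, List.foldl_append]
  have e1 : f ([], [], [], [], []) 0 =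
      ((PySem.List.pyRange 1 (size - 1)).map (fun y => ((0 : Int), y)), [], [], [], []) := by
    rw [hf]; simpa using row_left h ([], [], [], [], [])
  rw [e1]
  have e2 := fold_mid h (PySem.List.pyRange 1 (size - 1))
      (fun x hx => by rw [PySem.List.mem_pyRange_one] at hx; omega)
      ((PySem.List.pyRange 1 (size - 1)).map (fun y => ((0 : Int), y))) [] [] [] []
  rw [hf] at *
  rw [e2]
  simpa using row_right h _

-- degenerate sizes: the middle range is empty and the scan appends nothing
theorem scan_small {size : Int} (h : size ≤ 1) :
    (PySem.List.pyRange 0 size).foldl (fun st x =>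
        (PySem.List.pyRange 0 size).foldl (gridStep (size - 1) x) st)
      (([], [], [], [], []) : GridSt) = (([], [], [], [], []) : GridSt) := by
  by_cases h0 : size ≤ 0
  · have hnil : PySem.List.pyRange 0 size = [] := by
      rw [PySem.List.pyRange_one]
      have ht : (size - 0).toNat = 0 := by omega
      rw [ht]; simp
    simp [hnil]
  · have hs : size = 1 := by omega
    subst hs
    decide

-- B's port, with the scan body named (definitional)
theorem alt_scan (size : Int) : get_grid_info_alt size =
    (let st := (PySem.List.pyRange 0 size).foldl (fun st x =>
        (PySem.List.pyRange 0 size).foldl (gridStep (size - 1) x) st)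
      (([], [], [], [], []) : GridSt);
     [("corners", [(0, 0), (0, size - 1), (size - 1, 0), (size - 1, size - 1)]),
      ("left_edges", st.1), ("bottom_edges", st.2.2.1), ("right_edges", st.2.1),
      ("top_edges", st.2.2.2.1), ("inside", st.2.2.2.2)]) := rfl

-- ===== VERDICT (by name: the statement is the Claim_ definition above) =====
theorem get_grid_info_spec : Claim_equal_get_grid_info := by
  intro size _
  unfold Spec_get_grid_info
  by_cases h : size ≤ 1
  · have hM : PySem.List.pyRange 1 (size - 1) = [] := by
      rw [PySem.List.pyRange_one]
      have ht : (size - 1 - 1).toNat = 0 := by omega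
      rw [ht]; simp
    rw [alt_scan, scan_small h]
    simp [get_grid_info, hM]
  · rw [alt_scan, scan_eq (by omega : 2 ≤ size)]
    simp [get_grid_info]
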